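-- pv_equiv track=rewrite | github.com/Hintzelab/MABE | tools/nqr/custom/mabe.py | get_config_sections
-- ===== SOURCE A (Python) =====
-- from typing import List, Optional
--
-- def get_and_remove_next_config_section_from_lines(lines:List[str]) -> Optional[List[str]]:
--     result = None
--     if len(lines) < 2:
--         return result
--     # start on second line, skipping current section header (#SETTINGS_FILE)
--     # then we'll look for the next one, or the end of the file
--     i = 1
--     for i in range(i,len(lines)):
--         if lines[i].startswith('#SETTINGS_FILE'):
--             break
--     result = lines[:i+1]
--     del lines[:i+1]
--     return result
--
-- def get_config_sections(mabesettings:List[str]) -> List[List[str]]: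
--     sections = list()
--     while True:
--         section = get_and_remove_next_config_section_from_lines(mabesettings)
--         if not section:
--             break
--         sections.append(section)
--     return sections
-- ===== SOURCE B (Python) =====
-- def get_config_sections(mabesettings):
--     # One forward pass: accumulate lines; a '#SETTINGS_FILE' header that is not the
--     # first line of the current chunk closes that chunk (header included, as in A).
--     # Unlike A, this does not mutate mabesettings (A empties it down to <2 lines).
--     sections = []
--     cur = []
--     for line in mabesettings:
--         cur.append(line)
--         if len(cur) >= 2 and line.startswith('#SETTINGS_FILE'):
--             sections.append(cur)
--             cur = []
--     if len(cur) >= 2: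
--         sections.append(cur)
--     return sections
-- ===== Notes on version B (the rewrite author's own statement) =====
-- stated objective: alternative
-- what changed: Replaces the while-loop that repeatedly rescans and deletes a prefix of the list (del lines[:i+1]) with one forward pass that accumulates the current chunk and flushes it at each non-initial '#SETTINGS_FILE' header (plus a final flush if the tail has >=2 lines); B also does not mutate its argument, while A empties it.
import Mathlib
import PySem

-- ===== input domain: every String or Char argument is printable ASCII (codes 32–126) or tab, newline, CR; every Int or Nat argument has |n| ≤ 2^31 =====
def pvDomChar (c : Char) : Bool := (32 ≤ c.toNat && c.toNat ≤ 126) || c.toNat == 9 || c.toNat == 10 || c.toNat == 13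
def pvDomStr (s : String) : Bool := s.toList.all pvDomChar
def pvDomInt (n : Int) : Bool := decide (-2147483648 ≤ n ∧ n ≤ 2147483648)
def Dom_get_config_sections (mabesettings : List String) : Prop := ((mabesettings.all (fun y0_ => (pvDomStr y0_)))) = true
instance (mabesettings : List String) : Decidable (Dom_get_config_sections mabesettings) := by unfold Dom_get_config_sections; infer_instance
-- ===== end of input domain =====

-- B replaces A's rescan-and-delete while-loop by one forward accumulate-and-flush pass;
-- equivalence is about the RETURN value only: Python A empties its argument list in place, B does not mutate it.

-- ===== PORT A =====
-- the header predicate both Pythons test: line.startswith('#SETTINGS_FILE')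
def gcP (s : String) : Bool := PySem.Str.startswith s "#SETTINGS_FILE"

-- 'for i in range(1, len(lines)): if lines[i].startswith(...): break' — i ends as the
-- first matching index ≥ its start, or len-1 if none matches (range exhausted)
def gc_find (lines : List String) (i : Nat) : Nat :=
  if h : i < lines.length then
    if gcP lines[i] then i
    else if i + 1 < lines.length then gc_find lines (i + 1) else i
  else i
termination_by lines.length - i

-- get_and_remove_next_config_section_from_lines: returns (result, remaining lines);
-- lines[:i+1] / del lines[:i+1] with 0 ≤ i+1 are exactly take/drop (i+1)
def gc_helper (lines : List String) : Option (List String) × List String :=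
  if lines.length < 2 then (none, lines)
  else
    let i := gc_find lines 1
    (some (lines.take (i + 1)), lines.drop (i + 1))

-- termination fact the while-loop's recursion cites: a returned section strictly shrinks the list
theorem gc_helper_lt (lines s rest : List String)
    (h : gc_helper lines = (some s, rest)) : rest.length < lines.length := by
  unfold gc_helper at h
  split at h
  · simp at h
  · next hlen =>
    simp only [Prod.mk.injEq] at h
    obtain ⟨-, hr⟩ := h
    subst hr
    simp only [List.length_drop]
    omega

-- 'while True: section = helper(lines); if not section: break; sections.append(section)'
def gc_loop (lines : List String) (sections : List (List String)) : List (List String) :=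
  match h : gc_helper lines with
  | (none, _) => sections
  | (some s, rest) =>
    if s.isEmpty then sections
    else gc_loop rest (sections ++ [s])
termination_by lines.length
decreasing_by exact gc_helper_lt _ _ _ h

def get_config_sections (mabesettings : List String) : List (List String) :=
  gc_loop mabesettings []

-- ===== PORT B =====
-- single pass: cur accumulates the chunk; a header that is not the chunk's first line flushes it
def gcb_loop (lines : List String) (cur : List String) (sections : List (List String)) :
    List (List String) :=
  match lines with
  | [] => if 2 ≤ cur.length then sections ++ [cur] else sections
  | l :: rest =>
    let cur' := cur ++ [l]
    if 2 ≤ cur'.length ∧ gcP l then gcb_loop rest [] (sections ++ [cur'])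
    else gcb_loop rest cur' sections

def get_config_sections_alt (mabesettings : List String) : List (List String) :=
  gcb_loop mabesettings [] []

-- ===== PRECONDITION & SPEC =====
def Spec_get_config_sections (mabesettings : List String) (out : List (List String)) : Prop := out = get_config_sections_alt mabesettings
instance (mabesettings : List String) (out : List (List String)) : Decidable (Spec_get_config_sections mabesettings out) := by unfold Spec_get_config_sections; infer_instance

-- ===== CLAIM (what is proved, stated in full; the proofs are below) =====
def Claim_equal_get_config_sections : Prop := ∀ (mabesettings : List String), Dom_get_config_sections mabesettings → Spec_get_config_sections mabesettings (get_config_sections mabesettings)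

-- ===== LEMMAS AND PROOFS =====

-- characterisation of A's inner for-loop via the first matching index in the tail
theorem gc_find_spec (lines : List String) :
    ∀ i, i < lines.length →
      gc_find lines i =
        i + (((lines.drop i).findIdx? gcP).getD ((lines.drop i).length - 1)) := by
  have H : ∀ k i, i < lines.length → lines.length - i ≤ k →
      gc_find lines i =
        i + (((lines.drop i).findIdx? gcP).getD ((lines.drop i).length - 1)) := by
    intro k
    induction k with
    | zero => intro i h hk; omega
    | succ k ih =>
      intro i h hk
      rw [gc_find]
      rw [dif_pos h]
      have hdrop : lines.drop i = lines[i] :: lines.drop (i + 1) :=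
        List.drop_eq_getElem_cons h
      rw [hdrop, List.findIdx?_cons]
      by_cases hp : gcP lines[i]
      · simp [hp]
      · simp only [if_neg hp]
        by_cases hlt : i + 1 < lines.length
        · rw [if_pos hlt, ih (i + 1) hlt (by omega)]
          cases hfi : (lines.drop (i + 1)).findIdx? gcP with
          | some j =>
            simp only [Option.map_some, Option.getD_some]
            omega
          | none =>
            simp only [Option.map_none, Option.getD_none, List.length_cons,
              List.length_drop]
            omega
        · rw [if_neg hlt]
          have hnil : lines.drop (i + 1) = [] := List.drop_eq_nil_of_le (by omega)
          simp [hnil]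
  exact fun i h => H (lines.length - i) i h le_rfl

-- one-step equations for A's while-loop
theorem gc_loop_none (lines : List String) (secs : List (List String))
    (hg : (gc_helper lines).1 = none) : gc_loop lines secs = secs := by
  rw [gc_loop]
  split
  · rfl
  · rename_i s rest h'
    rw [h'] at hg
    simp at hg

theorem gc_loop_some (lines s rest : List String) (secs : List (List String))
    (hg : gc_helper lines = (some s, rest)) :
    gc_loop lines secs = if s.isEmpty then secs else gc_loop rest (secs ++ [s]) := by
  rw [gc_loop]
  split
  · rename_i snd h'
    rw [hg] at h'
    simp at h'
  · rename_i s' rest' h'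
    rw [hg] at h'
    simp only [Prod.mk.injEq, Option.some.injEq] at h'
    obtain ⟨h1, h2⟩ := h'
    rw [h1, h2]

-- B's scan with a nonempty current chunk: it runs to the first header in the tail (or the end)
theorem gcb_scan (rest : List String) :
    ∀ cur secs, cur ≠ [] →
      gcb_loop rest cur secs =
        match rest.findIdx? gcP with
        | some j => gcb_loop (rest.drop (j + 1)) [] (secs ++ [cur ++ rest.take (j + 1)])
        | none => if 2 ≤ (cur ++ rest).length then secs ++ [cur ++ rest] else secs := by
  induction rest with
  | nil => intro cur secs _; simp [gcb_loop]
  | cons r rs ih =>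
    intro cur secs hcur
    have hlen : 1 ≤ cur.length := List.length_pos_iff.mpr hcur
    rw [gcb_loop]
    rw [List.findIdx?_cons]
    by_cases hp : gcP r
    · rw [if_pos ⟨by simp; omega, hp⟩]
      simp [hp]
    · rw [if_neg (by simp [hp])]
      rw [ih (cur ++ [r]) secs (by simp)]
      simp only [hp, Bool.false_eq_true, if_false]
      cases hfi : rs.findIdx? gcP with
      | some j =>
        simp only [Option.map_some]
        simp [List.take_succ_cons, List.drop_succ_cons]
      | none =>
        simp only [Option.map_none]
        simp only [List.append_assoc, List.singleton_append, List.length_append,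
          List.length_cons]

-- the main equivalence, by strong induction on the length of the remaining lines
theorem gc_main : ∀ (n : Nat) (lines : List String) (secs : List (List String)),
    lines.length ≤ n → gc_loop lines secs = gcb_loop lines [] secs := by
  intro n
  induction n with
  | zero =>
    intro lines secs h
    have : lines = [] := List.length_eq_zero_iff.mp (by omega)
    subst this
    rw [gc_loop_none [] secs (by simp [gc_helper])]
    simp [gcb_loop]
  | succ n ih =>
    intro lines secs h
    match lines with
    | [] =>
      rw [gc_loop_none [] secs (by simp [gc_helper])]
      simp [gcb_loop]
    | [l] =>
      rw [gc_loop_none [l] secs (by simp [gc_helper])]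
      simp [gcb_loop]
    | l0 :: r :: rs =>
      set rest := r :: rs with hrest
      have hlen2 : ¬ (l0 :: rest).length < 2 := by simp [hrest]
      have hfind := gc_find_spec (l0 :: rest) 1 (by simp [hrest])
      have hdrop1 : (l0 :: rest).drop 1 = rest := rfl
      rw [hdrop1] at hfind
      -- B side: first step keeps cur' = [l0] (length 1 < 2), then scan
      have hB : gcb_loop (l0 :: rest) [] secs = gcb_loop rest [l0] secs := by
        rw [gcb_loop]; simp
      rw [hB, gcb_scan rest [l0] secs (by simp)]
      -- A side: one helper step
      have hstep : gc_helper (l0 :: rest) =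
          (some ((l0 :: rest).take (gc_find (l0 :: rest) 1 + 1)),
           (l0 :: rest).drop (gc_find (l0 :: rest) 1 + 1)) := by
        unfold gc_helper
        rw [if_neg hlen2]
      rw [gc_loop_some _ _ _ _ hstep]
      have hne : ¬ ((l0 :: rest).take (gc_find (l0 :: rest) 1 + 1)).isEmpty := by
        simp [List.take_succ_cons]
      rw [if_neg hne]
      cases hfi : rest.findIdx? gcP with
      | some j =>
        have hi : gc_find (l0 :: rest) 1 = 1 + j := by rw [hfind, hfi]; rfl
        rw [hi]
        have h1 : (l0 :: rest).take (1 + j + 1) = l0 :: rest.take (j + 1) := by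
          rw [show 1 + j + 1 = (j + 1) + 1 by omega, List.take_succ_cons]
        have h2 : (l0 :: rest).drop (1 + j + 1) = rest.drop (j + 1) := by
          rw [show 1 + j + 1 = (j + 1) + 1 by omega, List.drop_succ_cons]
        rw [h1, h2, ih (rest.drop (j + 1)) (secs ++ [l0 :: rest.take (j + 1)])
          (by simp [hrest] at h ⊢; omega)]
        simp
      | none =>
        have hi : gc_find (l0 :: rest) 1 = rest.length := by
          rw [hfind, hfi]
          simp only [Option.getD_none]
          simp only [hrest, List.length_cons]
          omega
        rw [hi]
        have h1 : (l0 :: rest).take (rest.length + 1) = l0 :: rest := by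
          simp
        have h2 : (l0 :: rest).drop (rest.length + 1) = [] := by
          apply List.drop_eq_nil_of_le; simp
        rw [h1, h2, gc_loop_none [] _ (by simp [gc_helper])]
        simp [hrest]

-- ===== VERDICT (by name: the statement is the Claim_ definition above) =====
theorem get_config_sections_spec : Claim_equal_get_config_sections := by
  intro mabesettings _
  unfold Spec_get_config_sections get_config_sections get_config_sections_alt
  exact gc_main mabesettings.length mabesettings [] le_rfl
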